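-- pv_equiv track=rewrite | github.com/ALALMO/AlgorithmCode | 03_Greedy/Programmers_uniform.py | removeDuple
-- ===== SOURCE A (Python) =====
-- def removeDuple(lost, reserve):
--     i = 0
--     j = 0
--     while i < len(lost) and j < len(reserve):
--         if (lost[i] == reserve[j]):
--             lost.pop(i)
--             reserve.pop(j)
--         elif (lost[i] > reserve[j]):
--             j = j + 1
--         else:
--             i = i + 1
--
--     return lost, reserve
-- ===== SOURCE B (Python) =====
-- def removeDuple(lost, reserve):
--     # Treat the inputs as stacks: reverse each once, then pop() from the end
--     # (O(1)) instead of pop(i) from the middle (O(n)); survivors are collected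
--     # into fresh output lists, so the arguments are NOT mutated (return value
--     # is identical to the original's).
--     a = lost[::-1]
--     b = reserve[::-1]
--     outL = []
--     outR = []
--     while a and b:
--         if a[-1] == b[-1]:
--             a.pop()
--             b.pop()
--         elif a[-1] > b[-1]:
--             outR.append(b.pop())
--         else:
--             outL.append(a.pop())
--     outL.extend(reversed(a))
--     outR.extend(reversed(b))
--     return outL, outR
-- ===== Notes on version B (the rewrite author's own statement) =====
-- stated objective: alternative
-- what changed: Replaces the in-place pop(i)/pop(j)-with-moving-indices loop by a stack discipline: each input is reversed once and consumed from its end with O(1) pop(), survivors are appended to fresh output lists and the residues re-reversed onto them, so no indices are kept and the arguments are not mutated (A's O(n) middle-pops disappear).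
import Mathlib
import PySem

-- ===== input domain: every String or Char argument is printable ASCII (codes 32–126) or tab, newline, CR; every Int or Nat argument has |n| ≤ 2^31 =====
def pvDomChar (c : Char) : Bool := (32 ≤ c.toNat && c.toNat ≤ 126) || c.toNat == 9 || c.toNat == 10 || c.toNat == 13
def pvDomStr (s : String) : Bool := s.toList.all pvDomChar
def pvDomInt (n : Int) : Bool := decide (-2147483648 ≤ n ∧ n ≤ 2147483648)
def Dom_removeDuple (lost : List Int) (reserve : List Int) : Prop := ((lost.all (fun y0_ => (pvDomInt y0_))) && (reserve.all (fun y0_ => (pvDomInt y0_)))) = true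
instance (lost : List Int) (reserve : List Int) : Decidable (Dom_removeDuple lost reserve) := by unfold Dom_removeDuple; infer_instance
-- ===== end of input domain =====

-- B replaces A's in-place pop(i)/pop(j)-with-indices loop by a stack discipline (reverse once,
-- pop from the end, collect survivors into fresh lists); equivalence is about the return value
-- only — A mutates its arguments, B does not.

-- ===== PORT A =====
-- A's while-loop: indices i, j over the (shrinking, popped-in-place) lists; the Nat fuel is a
-- structural totality guard only — with the fuel it is called with it never runs out.
def removeDupleLoopA : Nat → List Int → List Int → Nat → Nat → List Int × List Int
  | 0, lost, reserve, _, _ => (lost, reserve)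
  | fuel + 1, lost, reserve, i, j =>
    if h : i < lost.length ∧ j < reserve.length then
      if lost[i]'h.1 = reserve[j]'h.2 then
        removeDupleLoopA fuel (lost.eraseIdx i) (reserve.eraseIdx j) i j
      else if lost[i]'h.1 > reserve[j]'h.2 then
        removeDupleLoopA fuel lost reserve i (j + 1)
      else
        removeDupleLoopA fuel lost reserve (i + 1) j
    else (lost, reserve)

def removeDuple (lost : List Int) (reserve : List Int) : List Int × List Int :=
  removeDupleLoopA (lost.length + reserve.length) lost reserve 0 0

-- ===== PORT B =====
-- B's while-loop: 'while a and b' consuming each stack from its end (Python pop() = getLast /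
-- dropLast), appending survivors to outL/outR; on exit the residues are re-reversed onto them.
def removeDupleLoopB (a b outL outR : List Int) : List Int × List Int :=
  if h : a ≠ [] ∧ b ≠ [] then
    if a.getLast h.1 = b.getLast h.2 then
      removeDupleLoopB a.dropLast b.dropLast outL outR
    else if a.getLast h.1 > b.getLast h.2 then
      removeDupleLoopB a b.dropLast outL (outR ++ [b.getLast h.2])
    else
      removeDupleLoopB a.dropLast b (outL ++ [a.getLast h.1]) outR
  else (outL ++ a.reverse, outR ++ b.reverse)
termination_by a.length + b.length
decreasing_by
  · have := (List.length_dropLast (xs := a)); have := (List.length_dropLast (xs := b))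
    have ha : a.length ≠ 0 := fun hc => h.1 (List.eq_nil_of_length_eq_zero hc)
    have hb : b.length ≠ 0 := fun hc => h.2 (List.eq_nil_of_length_eq_zero hc)
    omega
  · have := (List.length_dropLast (xs := b))
    have hb : b.length ≠ 0 := fun hc => h.2 (List.eq_nil_of_length_eq_zero hc)
    omega
  · have := (List.length_dropLast (xs := a))
    have ha : a.length ≠ 0 := fun hc => h.1 (List.eq_nil_of_length_eq_zero hc)
    omega

def removeDuple_alt (lost : List Int) (reserve : List Int) : List Int × List Int :=
  removeDupleLoopB lost.reverse reserve.reverse [] []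

-- ===== PRECONDITION & SPEC =====
def Spec_removeDuple (lost : List Int) (reserve : List Int) (out : List Int × List Int) : Prop := out = removeDuple_alt lost reserve
instance (lost : List Int) (reserve : List Int) (out : List Int × List Int) : Decidable (Spec_removeDuple lost reserve out) := by unfold Spec_removeDuple; infer_instance

-- ===== CLAIM (what is proved, stated in full; the proofs are below) =====
def Claim_equal_removeDuple : Prop := ∀ (lost : List Int) (reserve : List Int), Dom_removeDuple lost reserve → Spec_removeDuple lost reserve (removeDuple lost reserve)

-- ===== LEMMAS AND PROOFS =====

-- Common pure core both loops reduce to: processes the two suffixes front-to-back.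
def pvCore : List Int → List Int → List Int × List Int
  | [], bs => ([], bs)
  | a :: as, [] => (a :: as, [])
  | a :: as, b :: bs =>
    if a = b then pvCore as bs
    else if a > b then
      let p := pvCore (a :: as) bs
      (p.1, b :: p.2)
    else
      let p := pvCore as (b :: bs)
      (a :: p.1, p.2)
termination_by as bs => as.length + bs.length

theorem pvCore_exhausted (lost reserve : List Int) (i j : Nat)
    (h : ¬(i < lost.length ∧ j < reserve.length)) :
    pvCore (lost.drop i) (reserve.drop j) = (lost.drop i, reserve.drop j) := by
  rcases Nat.lt_or_ge i lost.length with hlt | hge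
  · have hj' : reserve.length ≤ j := by by_contra hc; exact h ⟨hlt, by omega⟩
    rw [List.drop_eq_nil_of_le hj']
    cases hd : lost.drop i with
    | nil => rw [pvCore]
    | cons a as => rw [pvCore]
  · rw [List.drop_eq_nil_of_le hge, pvCore]

theorem loopA_eq_core (fuel : Nat) :
    ∀ (lost reserve : List Int) (i j : Nat),
    i ≤ lost.length → j ≤ reserve.length →
    (lost.length - i) + (reserve.length - j) ≤ fuel →
    removeDupleLoopA fuel lost reserve i j =
      (lost.take i ++ (pvCore (lost.drop i) (reserve.drop j)).1,
       reserve.take j ++ (pvCore (lost.drop i) (reserve.drop j)).2) := by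
  induction fuel with
  | zero =>
    intro lost reserve i j hi hj hf
    have hi' : i = lost.length := by omega
    have hj' : j = reserve.length := by omega
    rw [removeDupleLoopA, hi', hj']
    simp [pvCore]
  | succ fuel ih =>
    intro lost reserve i j hi hj hf
    rw [removeDupleLoopA]
    by_cases h : i < lost.length ∧ j < reserve.length
    · rw [dif_pos h]
      have hdl : lost.drop i = lost[i]'h.1 :: lost.drop (i + 1) := List.drop_eq_getElem_cons h.1
      have hdr : reserve.drop j = reserve[j]'h.2 :: reserve.drop (j + 1) := List.drop_eq_getElem_cons h.2
      by_cases heq : lost[i]'h.1 = reserve[j]'h.2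
      · rw [if_pos heq]
        have hel : lost.eraseIdx i = lost.take i ++ lost.drop (i + 1) := List.eraseIdx_eq_take_drop_succ ..
        have her : reserve.eraseIdx j = reserve.take j ++ reserve.drop (j + 1) := List.eraseIdx_eq_take_drop_succ ..
        have hli : (lost.take i).length = i := List.length_take_of_le hi
        have hrj : (reserve.take j).length = j := List.length_take_of_le hj
        have hle : (lost.eraseIdx i).length = lost.length - 1 := List.length_eraseIdx_of_lt h.1
        have hre : (reserve.eraseIdx j).length = reserve.length - 1 := List.length_eraseIdx_of_lt h.2
        rw [hdl, hdr, pvCore, if_pos heq]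
        rw [ih (lost.eraseIdx i) (reserve.eraseIdx j) i j (by omega) (by omega) (by omega)]
        rw [hel, her]
        rw [List.take_append_of_le_length (by omega), List.take_take,
            List.drop_append_of_le_length (by omega)]
        rw [List.take_append_of_le_length (by omega), List.take_take,
            List.drop_append_of_le_length (by omega)]
        simp
      · rw [if_neg heq]
        by_cases hgt : lost[i]'h.1 > reserve[j]'h.2
        · rw [if_pos hgt]
          have htj : reserve.take (j + 1) = reserve.take j ++ [reserve[j]'h.2] :=
            List.take_succ_eq_append_getElem h.2
          rw [ih lost reserve i (j + 1) hi h.2 (by omega)]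
          rw [hdl, hdr, pvCore, if_neg heq, if_pos hgt]
          simp
          rw [htj, List.append_assoc]
          rfl
        · rw [if_neg hgt]
          have hti : lost.take (i + 1) = lost.take i ++ [lost[i]'h.1] :=
            List.take_succ_eq_append_getElem h.1
          rw [ih lost reserve (i + 1) j h.1 hj (by omega)]
          rw [hdl, hdr, pvCore, if_neg heq, if_neg hgt]
          simp
          rw [hti, List.append_assoc]
          rfl
    · rw [dif_neg h, pvCore_exhausted lost reserve i j h]
      simp

theorem reverse_nonempty_eq (a : List Int) (h : a ≠ []) :
    a.reverse = a.getLast h :: a.dropLast.reverse := by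
  conv_lhs => rw [← List.dropLast_append_getLast h]
  simp

theorem loopB_eq_core (n : Nat) :
    ∀ (a b outL outR : List Int), a.length + b.length ≤ n →
    removeDupleLoopB a b outL outR =
      (outL ++ (pvCore a.reverse b.reverse).1, outR ++ (pvCore a.reverse b.reverse).2) := by
  induction n with
  | zero =>
    intro a b outL outR hn
    have ha : a = [] := List.eq_nil_of_length_eq_zero (by omega)
    have hb : b = [] := List.eq_nil_of_length_eq_zero (by omega)
    subst ha; subst hb
    rw [removeDupleLoopB]
    simp [pvCore]
  | succ n ih =>
    intro a b outL outR hn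
    rw [removeDupleLoopB]
    by_cases h : a ≠ [] ∧ b ≠ []
    · rw [dif_pos h]
      have hra := reverse_nonempty_eq a h.1
      have hrb := reverse_nonempty_eq b h.2
      have hla : a.length ≠ 0 := fun hc => h.1 (List.eq_nil_of_length_eq_zero hc)
      have hlb : b.length ≠ 0 := fun hc => h.2 (List.eq_nil_of_length_eq_zero hc)
      have hda := (List.length_dropLast (xs := a))
      have hdb := (List.length_dropLast (xs := b))
      by_cases heq : a.getLast h.1 = b.getLast h.2
      · rw [if_pos heq, ih a.dropLast b.dropLast outL outR (by omega)]
        rw [hra, hrb, pvCore, if_pos heq]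
      · rw [if_neg heq]
        by_cases hgt : a.getLast h.1 > b.getLast h.2
        · rw [if_pos hgt, ih a b.dropLast outL (outR ++ [b.getLast h.2]) (by omega)]
          conv_rhs => rw [hra, hrb, pvCore]
          rw [if_neg heq, if_pos hgt, ← hra]
          simp
        · rw [if_neg hgt, ih a.dropLast b (outL ++ [a.getLast h.1]) outR (by omega)]
          conv_rhs => rw [hra, hrb, pvCore]
          rw [if_neg heq, if_neg hgt, ← hrb]
          simp
    · rw [dif_neg h]
      rcases not_and_or.mp h with ha | hb
      · have ha' : a = [] := not_not.mp ha
        subst ha'; simp [pvCore]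
      · have hb' : b = [] := not_not.mp hb
        subst hb'
        cases hr : a.reverse with
        | nil => simp [pvCore]
        | cons x xs => rw [pvCore.eq_def]; simp

-- ===== VERDICT (by name: the statement is the Claim_ definition above) =====
theorem removeDuple_spec : Claim_equal_removeDuple := by
  intro lost reserve _
  unfold Spec_removeDuple removeDuple removeDuple_alt
  rw [loopA_eq_core (lost.length + reserve.length) lost reserve 0 0 (Nat.zero_le _) (Nat.zero_le _) (by omega),
      loopB_eq_core (lost.reverse.length + reserve.reverse.length) lost.reverse reserve.reverse [] [] (by simp)]
  simp
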